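-- pv_equiv track=rewrite | github.com/diegosramirez/bmad-orchestrator | src/bmad_orchestrator/utils/project_context.py | _detect_js_test_runner
-- ===== SOURCE A (Python) =====
-- _TEST_RUNNER_DEPS: list[tuple[str, str]] = [
--     ("@angular/core", "Jasmine / Karma"),  # Angular default
--     ("jest", "Jest"),
--     ("vitest", "Vitest"),
--     ("mocha", "Mocha"),
--     ("jasmine", "Jasmine"),
--     ("cypress", "Cypress"),
--     ("playwright", "Playwright"),
-- ]
--
-- def _detect_js_test_runner(all_deps: dict[str, str]) -> str:
--     # Angular is special: its presence implies Jasmine/Karma by default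
--     if "@angular/core" in all_deps:
--         for key, label in _TEST_RUNNER_DEPS:
--             if key == "@angular/core":
--                 continue
--             if key in all_deps:
--                 return label
--         return "Jasmine / Karma"
--     for key, label in _TEST_RUNNER_DEPS:
--         if key in all_deps:
--             return label
--     return ""
-- ===== SOURCE B (Python) =====
-- _TEST_RUNNER_DEPS: list[tuple[str, str]] = [
--     ("@angular/core", "Jasmine / Karma"),  # Angular default
--     ("jest", "Jest"),
--     ("vitest", "Vitest"),
--     ("mocha", "Mocha"),
--     ("jasmine", "Jasmine"),
--     ("cypress", "Cypress"),
--     ("playwright", "Playwright"),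
-- ]
--
-- # Priority rank of each non-Angular runner (position in _TEST_RUNNER_DEPS).
-- _RUNNER_RANK: dict[str, tuple[int, str]] = {
--     key: (i, label)
--     for i, (key, label) in enumerate(_TEST_RUNNER_DEPS)
--     if key != "@angular/core"
-- }
--
-- def _detect_js_test_runner(all_deps: dict[str, str]) -> str:
--     # Single pass over the DEPENDENCIES (not the runner table): keep the
--     # best-ranked runner seen so far; Angular only decides the fallback.
--     best = None
--     has_angular = False
--     for key in all_deps:
--         if key == "@angular/core":
--             has_angular = True
--         else:
--             r = _RUNNER_RANK.get(key)
--             if r is not None and (best is None or r[0] < best[0]):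
--                 best = r
--     if best is not None:
--         return best[1]
--     return "Jasmine / Karma" if has_angular else ""
-- ===== Notes on version B (the rewrite author's own statement) =====
-- stated objective: alternative
-- what changed: Inverts the traversal: instead of scanning the fixed runner table and probing the dependency dict per entry, B makes a single pass over the dependencies, looking each key up in a precomputed rank dict and keeping the minimum-rank runner, with an Angular flag deciding the fallback.
import Mathlib
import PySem

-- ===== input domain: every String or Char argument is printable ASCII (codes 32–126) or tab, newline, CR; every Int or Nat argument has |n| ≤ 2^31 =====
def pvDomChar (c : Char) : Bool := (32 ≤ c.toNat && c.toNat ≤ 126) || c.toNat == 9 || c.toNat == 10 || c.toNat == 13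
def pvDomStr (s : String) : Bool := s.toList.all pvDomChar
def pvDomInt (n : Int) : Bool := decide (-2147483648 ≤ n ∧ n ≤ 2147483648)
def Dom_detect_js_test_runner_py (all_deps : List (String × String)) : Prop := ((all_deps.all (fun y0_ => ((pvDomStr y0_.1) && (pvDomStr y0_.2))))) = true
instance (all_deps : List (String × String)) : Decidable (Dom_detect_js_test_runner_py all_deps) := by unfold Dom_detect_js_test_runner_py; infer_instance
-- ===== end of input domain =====

-- B inverts the traversal: one pass over the dependencies with a rank-dict lookup keeping the
-- minimum-rank runner (Angular only sets a fallback flag), instead of A's table scan probing the dict.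

-- ===== PORT A =====
-- the module constant _TEST_RUNNER_DEPS
def pvTestRunnerDeps : List (String × String) :=
  [("@angular/core", "Jasmine / Karma"), ("jest", "Jest"), ("vitest", "Vitest"),
   ("mocha", "Mocha"), ("jasmine", "Jasmine"), ("cypress", "Cypress"),
   ("playwright", "Playwright")]

-- 'key in all_deps' for a Python dict given as an association list
def pvDepsContains (all_deps : List (String × String)) (key : String) : Bool :=
  all_deps.any (fun p => p.1 == key)

-- A's first loop: skip the Angular entry, return the first present label
def pvLoopSkipAngular (deps : List (String × String)) (all_deps : List (String × String)) : Option String :=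
  match deps with
  | [] => none
  | (key, label) :: rest =>
      if key == "@angular/core" then pvLoopSkipAngular rest all_deps
      else if pvDepsContains all_deps key then some label
      else pvLoopSkipAngular rest all_deps

-- A's second loop: return the first present label
def pvLoopAll (deps : List (String × String)) (all_deps : List (String × String)) : Option String :=
  match deps with
  | [] => none
  | (key, label) :: rest =>
      if pvDepsContains all_deps key then some label
      else pvLoopAll rest all_deps

def detect_js_test_runner_py (all_deps : List (String × String)) : String :=
  if pvDepsContains all_deps "@angular/core" then
    match pvLoopSkipAngular pvTestRunnerDeps all_deps with
    | some label => label
    | none => "Jasmine / Karma"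
  else
    match pvLoopAll pvTestRunnerDeps all_deps with
    | some label => label
    | none => ""

-- ===== PORT B =====
-- the module constant _RUNNER_RANK (dict comprehension written out, as in Source B it is a fixed dict)
def pvRunnerRank : PySem.Dict String (Int × String) :=
  PySem.Dict.ofList
    [("jest", (1, "Jest")), ("vitest", (2, "Vitest")), ("mocha", (3, "Mocha")),
     ("jasmine", (4, "Jasmine")), ("cypress", (5, "Cypress")), ("playwright", (6, "Playwright"))]

-- Source B's loop body: state (best, has_angular)
def pvStep (st : Option (Int × String) × Bool) (kv : String × String) : Option (Int × String) × Bool :=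
  if kv.1 == "@angular/core" then (st.1, true)
  else
    match pvRunnerRank.get? kv.1 with
    | none => st
    | some r =>
        match st.1 with
        | none => (some r, st.2)
        | some b => if r.1 < b.1 then (some r, st.2) else st

def detect_js_test_runner_py_alt (all_deps : List (String × String)) : String :=
  let st := all_deps.foldl pvStep (none, false)
  match st.1 with
  | some b => b.2
  | none => if st.2 then "Jasmine / Karma" else ""

-- ===== PRECONDITION & SPEC =====
def Spec_detect_js_test_runner_py (all_deps : List (String × String)) (out : String) : Prop := out = detect_js_test_runner_py_alt all_deps
instance (all_deps : List (String × String)) (out : String) : Decidable (Spec_detect_js_test_runner_py all_deps out) := by unfold Spec_detect_js_test_runner_py; infer_instance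

-- ===== CLAIM (what is proved, stated in full; the proofs are below) =====
def Claim_equal_detect_js_test_runner_py : Prop := ∀ (all_deps : List (String × String)), Dom_detect_js_test_runner_py all_deps → Spec_detect_js_test_runner_py all_deps (detect_js_test_runner_py all_deps)

-- ===== LEMMAS AND PROOFS =====

-- left-biased minimum-by-rank on Option, identity none: the pure content of Source B's update
def pvMerge (a b : Option (Int × String)) : Option (Int × String) :=
  match b with
  | none => a
  | some r =>
      match a with
      | none => some r
      | some x => if r.1 < x.1 then some r else a

theorem pvMerge_none_left (b : Option (Int × String)) : pvMerge none b = b := by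
  cases b <;> rfl

theorem pvMerge_assoc (a b c : Option (Int × String)) :
    pvMerge (pvMerge a b) c = pvMerge a (pvMerge b c) := by
  cases c with
  | none => rfl
  | some pc =>
    cases b with
    | none => rfl
    | some pb =>
      cases a with
      | none => rw [pvMerge_none_left, pvMerge_none_left]
      | some pa =>
        obtain ⟨ra, la⟩ := pa
        obtain ⟨rb, lb⟩ := pb
        obtain ⟨rc, lc⟩ := pc
        by_cases h1 : rb < ra <;> by_cases h2 : rc < rb <;> by_cases h3 : rc < ra <;>
          simp [pvMerge, h1, h2, h3] <;> omega

-- the best-rank runner among the dependency keys (pure spec of the fold's first component)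
def pvBest (l : List (String × String)) : Option (Int × String) :=
  l.foldl (fun acc kv => pvMerge acc (pvRunnerRank.get? kv.1)) none

-- the fold IS (pvBest, angular-flag)
theorem foldl_pvStep_eq (l : List (String × String)) (b : Option (Int × String)) (a : Bool) :
    l.foldl pvStep (b, a) = (l.foldl (fun acc kv => pvMerge acc (pvRunnerRank.get? kv.1)) b,
                             a || pvDepsContains l "@angular/core") := by
  induction l generalizing b a with
  | nil => simp [pvDepsContains]
  | cons hd tl ih =>
    obtain ⟨k, v⟩ := hd
    by_cases hk : k = "@angular/core"
    · subst hk
      have hang : pvRunnerRank.get? "@angular/core" = none := rfl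
      have hstep : pvStep (b, a) ("@angular/core", v) = (b, true) := by
        simp [pvStep]
      have hc : pvDepsContains (("@angular/core", v) :: tl) "@angular/core" = true := by
        simp [pvDepsContains]
      simp only [List.foldl_cons, hstep, ih, hc, hang, pvMerge, Bool.true_or, Bool.or_true]
    · have hk' : (k == "@angular/core") = false := by simpa using hk
      have hstep : pvStep (b, a) (k, v) = (pvMerge b (pvRunnerRank.get? k), a) := by
        simp only [pvStep, hk', Bool.false_eq_true, if_false, pvMerge]
        cases h : pvRunnerRank.get? k <;> cases b <;> (simp; try (split_ifs <;> rfl))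
      have hc : pvDepsContains ((k, v) :: tl) "@angular/core" = pvDepsContains tl "@angular/core" := by
        simp [pvDepsContains, hk']
      simp only [List.foldl_cons, hstep, ih, hc]

-- the inner fold from any accumulator is pvMerge of the accumulator with pvBest
theorem foldl_pvMerge_eq (l : List (String × String)) (b : Option (Int × String)) :
    l.foldl (fun acc kv => pvMerge acc (pvRunnerRank.get? kv.1)) b = pvMerge b (pvBest l) := by
  induction l generalizing b with
  | nil => cases b <;> rfl
  | cons hd tl ih =>
    simp only [pvBest, List.foldl_cons]
    rw [ih, ih, pvMerge_none_left, pvMerge_assoc]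

-- pvBest as a pure function of the six membership booleans
def pvTable (b0 b1 b2 b3 b4 b5 : Bool) : Option (Int × String) :=
  if b0 then some (1, "Jest") else if b1 then some (2, "Vitest") else if b2 then some (3, "Mocha")
  else if b3 then some (4, "Jasmine") else if b4 then some (5, "Cypress")
  else if b5 then some (6, "Playwright") else none

-- merging one runner's rank into the table sets that runner's membership bit
theorem pvMergeRank_jest (b0 b1 b2 b3 b4 b5 : Bool) :
    pvMerge (pvRunnerRank.get? "jest") (pvTable b0 b1 b2 b3 b4 b5) = pvTable true b1 b2 b3 b4 b5 := by
  revert b0 b1 b2 b3 b4 b5; decide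

theorem pvMergeRank_vitest (b0 b1 b2 b3 b4 b5 : Bool) :
    pvMerge (pvRunnerRank.get? "vitest") (pvTable b0 b1 b2 b3 b4 b5) = pvTable b0 true b2 b3 b4 b5 := by
  revert b0 b1 b2 b3 b4 b5; decide

theorem pvMergeRank_mocha (b0 b1 b2 b3 b4 b5 : Bool) :
    pvMerge (pvRunnerRank.get? "mocha") (pvTable b0 b1 b2 b3 b4 b5) = pvTable b0 b1 true b3 b4 b5 := by
  revert b0 b1 b2 b3 b4 b5; decide

theorem pvMergeRank_jasmine (b0 b1 b2 b3 b4 b5 : Bool) :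
    pvMerge (pvRunnerRank.get? "jasmine") (pvTable b0 b1 b2 b3 b4 b5) = pvTable b0 b1 b2 true b4 b5 := by
  revert b0 b1 b2 b3 b4 b5; decide

theorem pvMergeRank_cypress (b0 b1 b2 b3 b4 b5 : Bool) :
    pvMerge (pvRunnerRank.get? "cypress") (pvTable b0 b1 b2 b3 b4 b5) = pvTable b0 b1 b2 b3 true b5 := by
  revert b0 b1 b2 b3 b4 b5; decide

theorem pvMergeRank_playwright (b0 b1 b2 b3 b4 b5 : Bool) :
    pvMerge (pvRunnerRank.get? "playwright") (pvTable b0 b1 b2 b3 b4 b5) = pvTable b0 b1 b2 b3 b4 true := by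
  revert b0 b1 b2 b3 b4 b5; decide

theorem pvBest_eq_table (l : List (String × String)) :
    pvBest l = pvTable (pvDepsContains l "jest") (pvDepsContains l "vitest")
      (pvDepsContains l "mocha") (pvDepsContains l "jasmine")
      (pvDepsContains l "cypress") (pvDepsContains l "playwright") := by
  induction l with
  | nil => rfl
  | cons hd tl ih =>
    obtain ⟨k, v⟩ := hd
    have hcons : ∀ key, pvDepsContains ((k, v) :: tl) key = ((k == key) || pvDepsContains tl key) := by
      intro key; simp [pvDepsContains]
    have hstep : pvBest ((k, v) :: tl) = pvMerge (pvRunnerRank.get? k) (pvBest tl) := by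
      simp only [pvBest, List.foldl_cons, pvMerge_none_left]
      rw [foldl_pvMerge_eq]; rfl
    rw [hstep, ih]
    simp only [hcons]
    by_cases h0 : k = "jest"
    · subst h0; simp [pvMergeRank_jest]
    by_cases h1 : k = "vitest"
    · subst h1; simp [pvMergeRank_vitest]
    by_cases h2 : k = "mocha"
    · subst h2; simp [pvMergeRank_mocha]
    by_cases h3 : k = "jasmine"
    · subst h3; simp [pvMergeRank_jasmine]
    by_cases h4 : k = "cypress"
    · subst h4; simp [pvMergeRank_cypress]
    by_cases h5 : k = "playwright"
    · subst h5; simp [pvMergeRank_playwright]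
    -- k names no runner: its rank lookup is none and no membership bit changes
    have hmk : pvRunnerRank = PySem.Dict.mk
        [("jest", (1, "Jest")), ("vitest", (2, "Vitest")), ("mocha", (3, "Mocha")),
         ("jasmine", (4, "Jasmine")), ("cypress", (5, "Cypress")), ("playwright", (6, "Playwright"))] := by
      rfl
    have hnone : pvRunnerRank.get? k = none := by
      simp [hmk, PySem.Dict.get?,
            show ("jest" == k) = false by simpa using Ne.symm h0,
            show ("vitest" == k) = false by simpa using Ne.symm h1,
            show ("mocha" == k) = false by simpa using Ne.symm h2,
            show ("jasmine" == k) = false by simpa using Ne.symm h3,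
            show ("cypress" == k) = false by simpa using Ne.symm h4,
            show ("playwright" == k) = false by simpa using Ne.symm h5]
    simp [hnone, pvMerge_none_left,
          show (k == "jest") = false by simpa using h0,
          show (k == "vitest") = false by simpa using h1,
          show (k == "mocha") = false by simpa using h2,
          show (k == "jasmine") = false by simpa using h3,
          show (k == "cypress") = false by simpa using h4,
          show (k == "playwright") = false by simpa using h5]

-- ===== VERDICT (by name: the statement is the Claim_ definition above) =====
theorem detect_js_test_runner_py_spec : Claim_equal_detect_js_test_runner_py := by
  intro l _
  unfold Spec_detect_js_test_runner_py detect_js_test_runner_py detect_js_test_runner_py_alt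
  rw [foldl_pvStep_eq, foldl_pvMerge_eq, pvMerge_none_left, pvBest_eq_table]
  simp only [Bool.false_or]
  cases hA : pvDepsContains l "@angular/core" <;>
    cases h0 : pvDepsContains l "jest" <;> cases h1 : pvDepsContains l "vitest" <;>
    cases h2 : pvDepsContains l "mocha" <;> cases h3 : pvDepsContains l "jasmine" <;>
    cases h4 : pvDepsContains l "cypress" <;> cases h5 : pvDepsContains l "playwright" <;>
    simp [pvLoopSkipAngular, pvLoopAll, pvTestRunnerDeps, pvTable, hA, h0, h1, h2, h3, h4, h5]
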